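-- pv_equiv track=rewrite | github.com/dadavid1o/Final_project_battleship-project | src/ship_input.py | _is_straight_contiguous
-- ===== SOURCE A (Python) =====
-- def _is_straight_contiguous(ship):
--     # ship: list of (x,y)
--     if len(ship) <= 1:
--         return True
--     xs = [c[0] for c in ship]
--     ys = [c[1] for c in ship]
--     if len(set(xs)) == 1:
--         y_sorted = sorted(ys)
--         return y_sorted == list(range(y_sorted[0], y_sorted[0] + len(ship)))
--     if len(set(ys)) == 1:
--         x_sorted = sorted(xs)
--         return x_sorted == list(range(x_sorted[0], x_sorted[0] + len(ship)))
--     return False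
-- ===== SOURCE B (Python) =====
-- def _axis_ok(vals):
--     # straight contiguous along this axis: all values distinct and span == len-1
--     return len(set(vals)) == len(vals) and max(vals) - min(vals) == len(vals) - 1
--
-- def _is_straight_contiguous(ship):
--     if len(ship) <= 1:
--         return True
--     xs = [c[0] for c in ship]
--     ys = [c[1] for c in ship]
--     if len(set(xs)) == 1:
--         return _axis_ok(ys)
--     if len(set(ys)) == 1:
--         return _axis_ok(xs)
--     return False
-- ===== Notes on version B (the rewrite author's own statement) =====
-- stated objective: simpler
-- what changed: Replaces A's sort-then-compare-against-range(...) check with an O(n) test: all values on the varying axis distinct (set cardinality) and max - min == len - 1.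
import Mathlib
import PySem

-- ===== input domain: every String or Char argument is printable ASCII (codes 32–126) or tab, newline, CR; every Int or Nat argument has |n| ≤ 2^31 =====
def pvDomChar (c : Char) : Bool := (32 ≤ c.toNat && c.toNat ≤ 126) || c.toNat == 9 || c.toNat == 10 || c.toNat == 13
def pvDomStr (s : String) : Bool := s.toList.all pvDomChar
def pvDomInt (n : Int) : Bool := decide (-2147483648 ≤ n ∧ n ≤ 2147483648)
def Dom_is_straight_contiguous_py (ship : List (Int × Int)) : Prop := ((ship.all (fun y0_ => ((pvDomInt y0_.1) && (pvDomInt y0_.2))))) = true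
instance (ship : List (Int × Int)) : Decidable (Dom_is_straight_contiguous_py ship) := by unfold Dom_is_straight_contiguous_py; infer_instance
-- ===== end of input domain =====

-- B replaces A's sort-and-compare-to-range check by an O(n) distinctness + span (max-min) test on the varying axis (simpler, no sort).

-- ===== PORT A =====
def is_straight_contiguous_py (ship : List (Int × Int)) : Bool :=
  if ship.length ≤ 1 then true
  else
    let xs := ship.map (fun c => c.1)
    let ys := ship.map (fun c => c.2)
    if (PySem.Set.ofList xs).length == 1 then
      let y_sorted := PySem.List.sorted ys (fun y => y) false
      -- y_sorted[0]: the list is nonempty here (len(ship) ≥ 2), so the default is never used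
      let y0 := PySem.List.pyGetD y_sorted 0 0
      y_sorted == PySem.List.pyRange y0 (y0 + (ship.length : Int)) 1
    else if (PySem.Set.ofList ys).length == 1 then
      let x_sorted := PySem.List.sorted xs (fun x => x) false
      let x0 := PySem.List.pyGetD x_sorted 0 0
      x_sorted == PySem.List.pyRange x0 (x0 + (ship.length : Int)) 1
    else false

-- ===== PORT B =====
-- max()/min() on an empty list would raise in Python; this helper is only called on nonempty lists (len(ship) ≥ 2)
def pvAxisOk (vals : List Int) : Bool :=
  ((PySem.Set.ofList vals).length == vals.length) &&
  (match PySem.List.max? vals (fun v => v), PySem.List.min? vals (fun v => v) with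
   | some mx, some mn => mx - mn == (vals.length : Int) - 1
   | _, _ => false)

def is_straight_contiguous_py_alt (ship : List (Int × Int)) : Bool :=
  if ship.length ≤ 1 then true
  else
    let xs := ship.map (fun c => c.1)
    let ys := ship.map (fun c => c.2)
    if (PySem.Set.ofList xs).length == 1 then
      pvAxisOk ys
    else if (PySem.Set.ofList ys).length == 1 then
      pvAxisOk xs
    else false

-- ===== PRECONDITION & SPEC =====
def Spec_is_straight_contiguous_py (ship : List (Int × Int)) (out : Bool) : Prop := out = is_straight_contiguous_py_alt ship
instance (ship : List (Int × Int)) (out : Bool) : Decidable (Spec_is_straight_contiguous_py ship out) := by unfold Spec_is_straight_contiguous_py; infer_instance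

-- ===== CLAIM (what is proved, stated in full; the proofs are below) =====
def Claim_equal_is_straight_contiguous_py : Prop := ∀ (ship : List (Int × Int)), Dom_is_straight_contiguous_py ship → Spec_is_straight_contiguous_py ship (is_straight_contiguous_py ship)

-- ===== LEMMAS AND PROOFS =====

-- set-cardinality = length ↔ no duplicates
lemma pvSetLen_iff_nodup (vs : List Int) :
    (PySem.Set.ofList vs).length = vs.length ↔ vs.Nodup := by
  constructor
  · intro h
    induction vs with
    | nil => simp
    | cons x t ih =>
      rw [PySem.Set.ofList_cons] at h
      simp only [List.length_cons, Nat.add_right_cancel_iff] at h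
      by_cases hx : x ∈ t
      · exfalso
        have hxs : x ∈ PySem.Set.ofList t := (PySem.Set.mem_ofList t x).mpr hx
        have hlt : (PySem.Set.discard (PySem.Set.ofList t) x).length
            < (PySem.Set.ofList t).length := by
          simp only [PySem.Set.discard]
          rw [List.length_filter_lt_length_iff_exists]
          exact ⟨x, hxs, by simp⟩
        have hle := PySem.Set.length_ofList_le t
        omega
      · have hd : PySem.Set.discard (PySem.Set.ofList t) x = PySem.Set.ofList t := by
          simp only [PySem.Set.discard]
          apply List.filter_eq_self.mpr
          intro y hy
          have : y ∈ t := (PySem.Set.mem_ofList t y).mp hy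
          rcases eq_or_ne y x with h' | h'
          · exact absurd (h' ▸ this) hx
          · simp [h']
        rw [hd] at h
        exact List.nodup_cons.mpr ⟨hx, ih h⟩
  · intro h
    rw [PySem.Set.ofList_eq_self_of_nodup vs h]

-- the sorted-equals-range test coincides with the distinct + span test, on a nonempty list
lemma pvAxisKey (vs : List Int) (hne : vs ≠ []) :
    (PySem.List.sorted vs (fun y => y) false ==
      PySem.List.pyRange (PySem.List.pyGetD (PySem.List.sorted vs (fun y => y) false) 0 0)
        (PySem.List.pyGetD (PySem.List.sorted vs (fun y => y) false) 0 0 + (vs.length : Int)) 1)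
    = pvAxisOk vs := by
  obtain ⟨mn, hmin⟩ : ∃ mn, PySem.List.min? vs (fun v => v) = some mn := by
    cases hm : PySem.List.min? vs (fun v => v) with
    | none => exact absurd ((PySem.List.min?_eq_none_iff vs _).mp hm) hne
    | some m => exact ⟨m, rfl⟩
  obtain ⟨mx, hmax⟩ : ∃ mx, PySem.List.max? vs (fun v => v) = some mx := by
    cases hm : PySem.List.max? vs (fun v => v) with
    | none => exact absurd ((PySem.List.max?_eq_none_iff vs _).mp hm) hne
    | some m => exact ⟨m, rfl⟩
  set s := PySem.List.sorted vs (fun y => y) false with hs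
  have hsne : s ≠ [] := by
    rw [hs, Ne, PySem.List.sorted_eq_nil_iff]; exact hne
  obtain ⟨m, t, hst⟩ : ∃ m t, s = m :: t := by
    cases hc : s with
    | nil => exact absurd hc hsne
    | cons a b => exact ⟨a, b, rfl⟩
  have hget : PySem.List.pyGetD s 0 0 = m := by rw [hst]; simp [pysem]
  have hperm : s.Perm vs := PySem.List.sorted_perm vs (fun y => y) false
  have hpw : s.Pairwise (· ≤ ·) := by
    simpa using PySem.List.sorted_pairwise vs (fun y => y)
  have hlen : s.length = vs.length := by rw [hs]; exact PySem.List.length_sorted vs _ _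
  have hmem : ∀ y, y ∈ s ↔ y ∈ vs := fun y => hperm.mem_iff
  have hnpos : 1 ≤ vs.length := List.length_pos_of_ne_nil hne
  unfold pvAxisOk
  rw [hget, hmin, hmax, Bool.eq_iff_iff]
  simp only [beq_iff_eq, Bool.and_eq_true]
  constructor
  · intro h
    have hnd_s : s.Nodup := by rw [h]; exact PySem.List.nodup_pyRange_one m _
    have hnd : vs.Nodup := hperm.nodup_iff.mp hnd_s
    refine ⟨(pvSetLen_iff_nodup vs).mpr hnd, ?_⟩
    have hmn_mem : mn ∈ s := (hmem mn).mpr (PySem.List.min?_mem hmin)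
    have h1 : m ≤ mn ∧ mn < m + vs.length := by
      rw [h, PySem.List.mem_pyRange_one] at hmn_mem; exact hmn_mem
    have hm_mem : m ∈ vs := (hmem m).mp (by rw [hst]; exact List.mem_cons_self)
    have h2 : mn ≤ m := PySem.List.min?_isMin hmin m hm_mem
    have hmx_mem : mx ∈ s := (hmem mx).mpr (PySem.List.max?_mem hmax)
    have h3 : mx < m + vs.length := by
      rw [h, PySem.List.mem_pyRange_one] at hmx_mem; exact hmx_mem.2
    have htop : (m + (vs.length : Int) - 1) ∈ s := by
      rw [h, PySem.List.mem_pyRange_one]; omega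
    have h4 : m + (vs.length : Int) - 1 ≤ mx :=
      PySem.List.max?_isMax hmax _ ((hmem _).mp htop)
    omega
  · rintro ⟨hlen1, h2⟩
    have hnd : vs.Nodup := (pvSetLen_iff_nodup vs).mp hlen1
    have hnd_s : s.Nodup := hperm.nodup_iff.mpr hnd
    have hbound : ∀ y ∈ vs, mn ≤ y ∧ y ≤ mx := fun y hy =>
      ⟨PySem.List.min?_isMin hmin y hy, PySem.List.max?_isMax hmax y hy⟩
    have hsub : s.toFinset ⊆ Finset.Icc mn mx := by
      intro y hy
      rw [List.mem_toFinset] at hy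
      rcases hbound y ((hmem y).mp hy) with ⟨ha, hb⟩
      exact Finset.mem_Icc.mpr ⟨ha, hb⟩
    have hcard : s.toFinset.card = vs.length := by
      rw [List.toFinset_card_of_nodup hnd_s, hlen]
    have hicc : (Finset.Icc mn mx).card = vs.length := by
      rw [Int.card_Icc]; omega
    have heq : s.toFinset = Finset.Icc mn mx :=
      Finset.eq_of_subset_of_card_le hsub (by rw [hcard, hicc])
    have hmemIcc : ∀ y, y ∈ s ↔ (mn ≤ y ∧ y ≤ mx) := by
      intro y
      rw [← List.mem_toFinset, heq, Finset.mem_Icc]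
    have hpermR : (PySem.List.pyRange mn (mn + vs.length) 1).Perm vs := by
      have hsp : s.Perm (PySem.List.pyRange mn (mn + vs.length) 1) := by
        rw [List.perm_ext_iff_of_nodup hnd_s (PySem.List.nodup_pyRange_one mn _)]
        intro y
        rw [hmemIcc y, PySem.List.mem_pyRange_one]
        omega
      exact hsp.symm.trans hperm
    have hSR : s = PySem.List.pyRange mn (mn + vs.length) 1 :=
      PySem.List.sorted_eq_of_perm_of_pairwise_lt vs _ (fun y => y) hpermR
        (by simpa using PySem.List.pairwise_lt_pyRange_one mn (mn + vs.length))
    have hm : m = mn := by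
      rw [hst, PySem.List.pyRange_one_cons (by omega : mn < mn + (vs.length : Int))] at hSR
      exact (List.cons_eq_cons.mp hSR).1
    rw [hm]
    exact hSR

-- ===== VERDICT (by name: the statement is the Claim_ definition above) =====
theorem is_straight_contiguous_py_spec : Claim_equal_is_straight_contiguous_py := by
  intro ship _
  unfold Spec_is_straight_contiguous_py is_straight_contiguous_py is_straight_contiguous_py_alt
  by_cases h1 : ship.length ≤ 1
  · simp [h1]
  · have hne : ship ≠ [] := by
      intro h; subst h; simp at h1
    simp only [h1, if_false]
    have hys : ship.map (fun c => c.2) ≠ [] := by simpa using hne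
    have hxs : ship.map (fun c => c.1) ≠ [] := by simpa using hne
    have e2 := pvAxisKey (ship.map (fun c => c.2)) hys
    have e1 := pvAxisKey (ship.map (fun c => c.1)) hxs
    simp only [List.length_map] at e1 e2
    split_ifs <;> simp_all
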